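-- pv_equiv track=rewrite | github.com/ochavarria/Proyectos-TEC | Progras/Python/Introduccion/Calendario.py | buscando_AyTyF
-- ===== SOURCE A (Python) =====
-- def buscando_AyTyF(lista,titulo,Apellido,Fecha):
--     if(lista==[]):
--         return []
--     else:
--         if(pertenece(lista[0],titulo)and(pertenece(lista[0],Apellido)and(pertenece(lista[0],Fecha)))):
--             return lista[0]+buscando_AyTyF(lista[1:],titulo,Apellido,Fecha)
--
--         else:
--             return buscando_AyTyF(lista[1:],titulo,Apellido,Fecha)
--
-- def pertenece(lista,inp):
--     if(lista==[]):
--         return False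
--     else:
--         if(lista[0]==inp):
--             return True
--         else:
--             return pertenece(lista[1:],inp)
-- ===== SOURCE B (Python) =====
-- def buscando_AyTyF(lista, titulo, Apellido, Fecha):
--     result = []
--     for row in lista:
--         if titulo in row and Apellido in row and Fecha in row:
--             result += row
--     return result
-- ===== Notes on version B (the rewrite author's own statement) =====
-- stated objective: faster
-- what changed: Replaces A's tail recursion over list slices (which copies the remaining list at every step) and its recursive `pertenece` membership helper with a single iterative loop over the rows using the built-in `in` test and an accumulator extended in place.
import Mathlib
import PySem

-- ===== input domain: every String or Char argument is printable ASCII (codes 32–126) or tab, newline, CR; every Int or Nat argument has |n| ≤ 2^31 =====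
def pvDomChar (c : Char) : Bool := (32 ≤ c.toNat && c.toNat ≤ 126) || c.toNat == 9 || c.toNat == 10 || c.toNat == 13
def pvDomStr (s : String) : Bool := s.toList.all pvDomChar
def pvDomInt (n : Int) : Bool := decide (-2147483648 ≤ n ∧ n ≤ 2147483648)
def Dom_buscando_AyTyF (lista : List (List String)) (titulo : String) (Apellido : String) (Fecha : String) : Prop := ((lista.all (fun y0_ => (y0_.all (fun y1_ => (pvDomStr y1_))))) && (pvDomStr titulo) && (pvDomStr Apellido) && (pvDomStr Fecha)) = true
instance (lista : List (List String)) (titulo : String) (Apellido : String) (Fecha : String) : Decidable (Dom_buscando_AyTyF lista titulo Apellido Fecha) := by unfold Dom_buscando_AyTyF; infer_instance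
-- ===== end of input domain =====

-- B replaces A's recursion over slices and recursive membership helper by one
-- loop with an accumulator and the built-in membership test (objective: simpler).


-- ===== PORT A =====
def pertenece (lista : List String) (inp : String) : Bool :=
  match lista with
  | [] => false
  | x :: rest => if x = inp then true else pertenece rest inp

def buscando_AyTyF (lista : List (List String)) (titulo : String) (Apellido : String) (Fecha : String) : List String :=
  match lista with
  | [] => []
  | r :: rest =>
    if pertenece r titulo && (pertenece r Apellido && pertenece r Fecha) then
      r ++ buscando_AyTyF rest titulo Apellido Fecha
    else
      buscando_AyTyF rest titulo Apellido Fecha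

-- ===== PORT B =====
def buscando_AyTyF_alt (lista : List (List String)) (titulo : String) (Apellido : String) (Fecha : String) : List String :=
  lista.foldl
    (fun result row =>
      if row.contains titulo && row.contains Apellido && row.contains Fecha then
        result ++ row
      else result)
    []

-- ===== PRECONDITION & SPEC =====
def Spec_buscando_AyTyF (lista : List (List String)) (titulo : String) (Apellido : String) (Fecha : String) (out : List String) : Prop := out = buscando_AyTyF_alt lista titulo Apellido Fecha
instance (lista : List (List String)) (titulo : String) (Apellido : String) (Fecha : String) (out : List String) : Decidable (Spec_buscando_AyTyF lista titulo Apellido Fecha out) := by unfold Spec_buscando_AyTyF; infer_instance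

-- ===== CLAIM (what is proved, stated in full; the proofs are below) =====
def Claim_equal_buscando_AyTyF : Prop := ∀ (lista : List (List String)) (titulo : String) (Apellido : String) (Fecha : String), Dom_buscando_AyTyF lista titulo Apellido Fecha → Spec_buscando_AyTyF lista titulo Apellido Fecha (buscando_AyTyF lista titulo Apellido Fecha)

-- ===== LEMMAS AND PROOFS =====
theorem pertenece_eq_contains (lista : List String) (inp : String) :
    pertenece lista inp = lista.contains inp := by
  induction lista with
  | nil => rfl
  | cons x rest ih =>
    rw [pertenece, List.contains_cons]
    by_cases h : x = inp
    · subst h; simp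
    · rw [if_neg h, ih]
      have : (inp == x) = false := beq_eq_false_iff_ne.mpr (fun e => h e.symm)
      rw [this, Bool.false_or]

theorem foldl_acc_buscando (lista : List (List String)) (titulo Apellido Fecha : String)
    (acc : List String) :
    lista.foldl
      (fun result row =>
        if row.contains titulo && row.contains Apellido && row.contains Fecha then
          result ++ row
        else result) acc
    = acc ++ buscando_AyTyF lista titulo Apellido Fecha := by
  induction lista generalizing acc with
  | nil => simp [buscando_AyTyF]
  | cons r rest ih =>
    rw [List.foldl_cons, buscando_AyTyF, pertenece_eq_contains, pertenece_eq_contains,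
      pertenece_eq_contains]
    by_cases h : (r.contains titulo && (r.contains Apellido && r.contains Fecha)) = true
    · rw [if_pos h, if_pos (by rw [← Bool.and_assoc] at h; exact h), ih, List.append_assoc]
    · rw [if_neg h, if_neg (by rw [← Bool.and_assoc] at h; exact h), ih]

-- ===== VERDICT (by name: the statement is the Claim_ definition above) =====
theorem buscando_AyTyF_spec : Claim_equal_buscando_AyTyF := by
  intro lista titulo Apellido Fecha _
  unfold Spec_buscando_AyTyF buscando_AyTyF_alt
  rw [foldl_acc_buscando]
  simp
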